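-- pv_equiv track=rewrite | github.com/joshuacox/adventOfCode2025 | 2-1.py | sum_invalid_ids_in_ranges
-- ===== SOURCE A (Python) =====
-- from typing import List, Tuple
--
-- def sum_invalid_ids_in_ranges(ranges: List[Tuple[int, int]], invalid_ids: List[int]) -> int:
--     """
--     Given a list of ranges and a pre‑computed sorted list of invalid IDs,
--     compute the sum of all invalid IDs that fall inside any of the ranges.
--     """
--     total = 0
--     # Ensure the list is sorted for efficient scanning
--     invalid_ids.sort()
--     idx = 0
--     n = len(invalid_ids)
--
--     # Process each range in ascending order of start to keep the scan linear
--     for start, end in sorted(ranges, key=lambda x: x[0]):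
--         # Advance idx to the first candidate >= start
--         while idx < n and invalid_ids[idx] < start:
--             idx += 1
--         # Add all candidates <= end
--         j = idx
--         while j < n and invalid_ids[j] <= end:
--             total += invalid_ids[j]
--             j += 1
--         # Keep idx where we left off for the next range (ranges are sorted)
--         idx = j
--     return total
-- ===== SOURCE B (Python) =====
-- def sum_invalid_ids_in_ranges(ranges, invalid_ids):
--     # keep A's observable in-place sort of the argument
--     invalid_ids.sort()
--     return sum(v for v in invalid_ids
--                if any(start <= v <= end for start, end in ranges))
-- ===== Notes on version B (the rewrite author's own statement) =====
-- stated objective: simpler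
-- what changed: Replaces A's sort-both-then-merge scan with monotonic index pointers by a direct one-liner summing each id that lies in any range; same total since A counts each id occurrence once iff it is in the union of ranges.
import Mathlib
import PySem

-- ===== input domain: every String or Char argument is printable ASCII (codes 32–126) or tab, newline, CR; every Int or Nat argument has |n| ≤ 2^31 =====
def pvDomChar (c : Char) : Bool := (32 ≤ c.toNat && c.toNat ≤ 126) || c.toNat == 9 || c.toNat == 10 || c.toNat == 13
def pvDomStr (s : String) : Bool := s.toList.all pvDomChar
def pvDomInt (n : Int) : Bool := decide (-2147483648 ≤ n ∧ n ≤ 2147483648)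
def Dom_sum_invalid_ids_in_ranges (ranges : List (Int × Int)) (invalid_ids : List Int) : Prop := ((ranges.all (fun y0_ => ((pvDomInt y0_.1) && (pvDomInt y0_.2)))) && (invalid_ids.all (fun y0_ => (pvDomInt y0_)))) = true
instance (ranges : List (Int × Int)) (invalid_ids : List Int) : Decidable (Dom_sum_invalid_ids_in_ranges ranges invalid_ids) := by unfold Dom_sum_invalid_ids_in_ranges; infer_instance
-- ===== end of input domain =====

-- B replaces A's merge scan with a direct any-range membership sum (simpler); equivalence is
-- about the RETURN value: A sorts invalid_ids in place, and Source B performs the same mutation.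

-- ===== PORT A =====
-- while idx < n and invalid_ids[idx] < start: idx += 1
def pvAdvance (ids : List Int) (start : Int) (idx : Nat) : Nat :=
  if h : idx < ids.length then
    if ids[idx] < start then pvAdvance ids start (idx + 1) else idx
  else idx
termination_by ids.length - idx

-- while j < n and invalid_ids[j] <= end: total += invalid_ids[j]; j += 1
def pvAddRun (ids : List Int) (e : Int) (j : Nat) (total : Int) : Int × Nat :=
  if h : j < ids.length then
    if ids[j] ≤ e then pvAddRun ids e (j + 1) (total + ids[j]) else (total, j)
  else (total, j)
termination_by ids.length - j

def sum_invalid_ids_in_ranges (ranges : List (Int × Int)) (invalid_ids : List Int) : Int :=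
  let ids := PySem.List.sorted invalid_ids (fun x => x) false
  let st := (PySem.List.sorted ranges (fun x => x.1) false).foldl
      (fun (st : Int × Nat) r => pvAddRun ids r.2 (pvAdvance ids r.1 st.2) st.1)
      ((0 : Int), (0 : Nat))
  st.1

-- ===== PORT B =====
def sum_invalid_ids_in_ranges_alt (ranges : List (Int × Int)) (invalid_ids : List Int) : Int :=
  ((PySem.List.sorted invalid_ids (fun x => x) false).filter
      (fun v => ranges.any (fun r => decide (r.1 ≤ v) && decide (v ≤ r.2)))).sum

-- ===== PRECONDITION & SPEC =====
def Spec_sum_invalid_ids_in_ranges (ranges : List (Int × Int)) (invalid_ids : List Int) (out : Int) : Prop := out = sum_invalid_ids_in_ranges_alt ranges invalid_ids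
instance (ranges : List (Int × Int)) (invalid_ids : List Int) (out : Int) : Decidable (Spec_sum_invalid_ids_in_ranges ranges invalid_ids out) := by unfold Spec_sum_invalid_ids_in_ranges; infer_instance

-- ===== CLAIM (what is proved, stated in full; the proofs are below) =====
def Claim_equal_sum_invalid_ids_in_ranges : Prop := ∀ (ranges : List (Int × Int)) (invalid_ids : List Int), Dom_sum_invalid_ids_in_ranges ranges invalid_ids → Spec_sum_invalid_ids_in_ranges ranges invalid_ids (sum_invalid_ids_in_ranges ranges invalid_ids)

-- ===== LEMMAS AND PROOFS =====

-- pvAdvance skips exactly the leading elements < start of the remaining suffix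
lemma pvAdvance_eq (ids : List Int) (s : Int) (idx : Nat) :
    pvAdvance ids s idx = idx + ((ids.drop idx).takeWhile (fun v => decide (v < s))).length := by
  by_cases h : idx < ids.length
  · rw [pvAdvance, dif_pos h, List.drop_eq_getElem_cons h]
    by_cases hv : ids[idx] < s
    · rw [if_pos hv, pvAdvance_eq ids s (idx + 1),
        List.takeWhile_cons_of_pos (p := fun v => decide (v < s)) (by simpa using hv), List.length_cons]
      omega
    · rw [if_neg hv, List.takeWhile_cons_of_neg (p := fun v => decide (v < s)) (by simpa using hv), List.length_nil, Nat.add_zero]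
  · rw [pvAdvance, dif_neg h, List.drop_eq_nil_of_le (Nat.le_of_not_lt h)]
    simp
termination_by ids.length - idx

-- pvAddRun consumes exactly the leading elements ≤ e of the remaining suffix, summing them
lemma pvAddRun_eq (ids : List Int) (e : Int) (j : Nat) (total : Int) :
    pvAddRun ids e j total =
      (total + ((ids.drop j).takeWhile (fun v => decide (v ≤ e))).sum,
       j + ((ids.drop j).takeWhile (fun v => decide (v ≤ e))).length) := by
  by_cases h : j < ids.length
  · rw [pvAddRun, dif_pos h, List.drop_eq_getElem_cons h]
    by_cases hv : ids[j] ≤ e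
    · rw [if_pos hv, pvAddRun_eq ids e (j + 1) (total + ids[j]),
        List.takeWhile_cons_of_pos (p := fun v => decide (v ≤ e)) (by simpa using hv), List.sum_cons, List.length_cons,
        Prod.mk.injEq]
      exact ⟨by ring, by omega⟩
    · rw [if_neg hv, List.takeWhile_cons_of_neg (p := fun v => decide (v ≤ e)) (by simpa using hv), List.sum_nil,
        List.length_nil, Int.add_zero, Nat.add_zero]
  · rw [pvAddRun, dif_neg h, List.drop_eq_nil_of_le (Nat.le_of_not_lt h)]
    simp
termination_by ids.length - j

-- on a ≤-sorted list, a downward-closed predicate is false on all of dropWhile p l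
lemma pw_dropWhile_false (p : Int → Bool) (hp : ∀ x y : Int, x ≤ y → p y = true → p x = true)
    (l : List Int) :
    l.Pairwise (· ≤ ·) → ∀ v ∈ l.dropWhile p, p v = false := by
  induction l with
  | nil => intro _ v hv; simp at hv
  | cons a t ih =>
    intro hl v hv
    rw [List.pairwise_cons] at hl
    rw [List.dropWhile_cons] at hv
    by_cases ha : p a = true
    · rw [if_pos ha] at hv
      exact ih hl.2 v hv
    · rw [if_neg ha] at hv
      rcases List.mem_cons.mp hv with rfl | hvt
      · exact Bool.eq_false_iff.mpr ha
      · cases hpv : p v with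
        | false => rfl
        | true => exact absurd (hp a v (hl.1 v hvt) hpv) ha

lemma drop_takeWhile_len (l : List Int) (p : Int → Bool) :
    l.drop (l.takeWhile p).length = l.dropWhile p := by
  have h := List.takeWhile_append_dropWhile (p := p) (l := l)
  calc l.drop (l.takeWhile p).length
      = ((l.takeWhile p) ++ (l.dropWhile p)).drop (l.takeWhile p).length := by rw [h]
    _ = l.dropWhile p := List.drop_left

lemma any_perm_eq {a : Type} {l1 l2 : List a} (h : l1.Perm l2) (f : a -> Bool) :
    l1.any f = l2.any f := by
  cases hb : l2.any f
  · rw [List.any_eq_false] at hb ⊢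
    intro x hx
    exact hb x (h.mem_iff.mp hx)
  · rw [List.any_eq_true] at hb ⊢
    obtain ⟨x, hx, hfx⟩ := hb
    exact ⟨x, h.mem_iff.mpr hx, hfx⟩

lemma foldA_eq (ids : List Int) (hids : ids.Pairwise (· ≤ ·)) :
    ∀ (rs : List (Int × Int)), rs.Pairwise (fun a b => a.1 ≤ b.1) →
    ∀ (idx : Nat) (total : Int),
    (rs.foldl (fun (st : Int × Nat) r => pvAddRun ids r.2 (pvAdvance ids r.1 st.2) st.1)
        (total, idx)).1
      = total + ((ids.drop idx).filter
          (fun v => rs.any (fun r => decide (r.1 ≤ v) && decide (v ≤ r.2)))).sum := by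
  intro rs
  induction rs with
  | nil => intro _ idx total; simp
  | cons r rest ih =>
    intro hrs idx total
    rw [List.pairwise_cons] at hrs
    have hl : (ids.drop idx).Pairwise (· ≤ ·) :=
      List.Pairwise.sublist (List.drop_sublist idx ids) hids
    set l := ids.drop idx with hldef
    set p1 : Int → Bool := fun v => decide (v < r.1) with hp1
    set p2 : Int → Bool := fun v => decide (v ≤ r.2) with hp2
    set t1 := l.takeWhile p1 with ht1
    set l1 := l.dropWhile p1 with hl1
    have hdrop1 : ids.drop (idx + t1.length) = l1 := by
      rw [← List.drop_drop, ← hldef, drop_takeWhile_len]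
    have hl1pw : l1.Pairwise (· ≤ ·) := List.Pairwise.sublist (List.dropWhile_sublist p1) hl
    set t2 := l1.takeWhile p2 with ht2
    set l2 := l1.dropWhile p2 with hl2
    have hdrop2 : ids.drop (idx + t1.length + t2.length) = l2 := by
      rw [← List.drop_drop, hdrop1, drop_takeWhile_len]
    rw [List.foldl_cons, pvAdvance_eq, pvAddRun_eq, ← hldef, ← ht1, hdrop1, ← ht2,
      ih hrs.2 (idx + t1.length + t2.length) (total + t2.sum), hdrop2]
    -- split l into t1 ++ t2 ++ l2 and evaluate the filter on each block
    have hsplit : l = t1 ++ (t2 ++ l2) := by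
      rw [ht2, hl2, List.takeWhile_append_dropWhile, hl1, ht1,
        List.takeWhile_append_dropWhile]
    set P : Int → Bool :=
      fun v => ((r :: rest).any (fun q => decide (q.1 ≤ v) && decide (v ≤ q.2))) with hP
    have hft1 : t1.filter P = [] := by
      rw [List.filter_eq_nil_iff]
      intro v hv
      have hvlt : v < r.1 := by
        have := List.mem_takeWhile_imp hv
        simpa [hp1] using this
      simp only [hP, List.any_cons, List.any_eq_true, Bool.or_eq_true, Bool.and_eq_true,
        decide_eq_true_eq, not_or, not_exists, not_and]
      constructor
      · intro hc; omega
      · intro q hq hq1 ; exfalso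
        have := hrs.1 q hq
        omega
    have hft2 : t2.filter P = t2 := by
      rw [List.filter_eq_self]
      intro v hv
      have hvle : v ≤ r.2 := by
        have := List.mem_takeWhile_imp hv
        simpa [hp2] using this
      have hvmem : v ∈ l1 := List.Sublist.mem hv (List.takeWhile_sublist p2)
      have hge : r.1 ≤ v := by
        have := pw_dropWhile_false p1 (by intro x y hxy hy; simp [hp1] at *; omega) l hl v
          (by rw [← hl1] at *; exact hvmem)
        simp [hp1] at this
        omega
      simp [hP, hge, hvle]
    have hfl2 : l2.filter P =
        l2.filter (fun v => rest.any (fun q => decide (q.1 ≤ v) && decide (v ≤ q.2))) := by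
      apply List.filter_congr
      intro v hv
      have hgt : r.2 < v := by
        have := pw_dropWhile_false p2 (by intro x y hxy hy; simp [hp2] at *; omega) l1 hl1pw v
          (by rw [← hl2] at *; exact hv)
        simp [hp2] at this
        omega
      simp [hP, List.any_cons]
      intro h1 h2
      omega
    rw [hsplit, List.filter_append, List.filter_append, hft1, hft2, hfl2]
    simp
    ring

-- ===== VERDICT (by name: the statement is the Claim_ definition above) =====
theorem sum_invalid_ids_in_ranges_spec : Claim_equal_sum_invalid_ids_in_ranges := by
  intro ranges invalid_ids _
  unfold Spec_sum_invalid_ids_in_ranges sum_invalid_ids_in_ranges sum_invalid_ids_in_ranges_alt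
  have hids : (PySem.List.sorted invalid_ids (fun x => x) false).Pairwise (· ≤ ·) :=
    PySem.List.sorted_pairwise invalid_ids (fun x => x)
  have hrs : (PySem.List.sorted ranges (fun x => x.1) false).Pairwise (fun a b => a.1 ≤ b.1) :=
    PySem.List.sorted_pairwise ranges (fun x => x.1)
  rw [foldA_eq _ hids _ hrs 0 0, List.drop_zero, Int.zero_add]
  apply congrArg
  apply List.filter_congr
  intro v _
  exact any_perm_eq (PySem.List.sorted_perm ranges (fun x => x.1) false) _
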